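-- pv_equiv track=rewrite | github.com/Nishant1998/COVID_19_Data_Analysis | peaks_generator.py | maxpt
-- ===== SOURCE A (Python) =====
-- def maxpt(x,y):
--     maxval = 0
--     p = 0
--     for i in x:
--         if maxval <= y[i]:
--             maxval = y[i]
--             p = i
--     return p
-- ===== SOURCE B (Python) =====
-- def maxpt(x, y):
--     vals = [y[i] for i in x]
--     m = max([0, *vals])
--     p = 0
--     for i, v in zip(x, vals):
--         if v == m:
--             p = i
--     return p
-- ===== Notes on version B (the rewrite author's own statement) =====
-- stated objective: alternative
-- what changed: Replaces the single running-max/argmax loop by a two-pass decomposition: first compute the winning value m = max of the looked-up values with the 0 seed, then a second scan keeps the last index whose value equals m.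
import Mathlib
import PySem

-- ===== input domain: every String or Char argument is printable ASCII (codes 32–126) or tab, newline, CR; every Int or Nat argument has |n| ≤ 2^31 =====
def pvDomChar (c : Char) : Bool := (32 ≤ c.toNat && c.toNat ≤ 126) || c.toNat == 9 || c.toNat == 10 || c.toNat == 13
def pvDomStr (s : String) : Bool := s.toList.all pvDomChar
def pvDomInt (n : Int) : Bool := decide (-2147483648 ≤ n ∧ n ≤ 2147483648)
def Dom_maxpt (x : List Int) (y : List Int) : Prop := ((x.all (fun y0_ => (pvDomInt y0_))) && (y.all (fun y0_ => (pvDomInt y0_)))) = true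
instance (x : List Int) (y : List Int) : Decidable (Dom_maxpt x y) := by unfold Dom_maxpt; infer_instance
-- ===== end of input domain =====

-- B replaces A's single running-max/argmax loop by a two-pass decomposition
-- (compute the winning value with its 0 seed first, then keep the last index
-- achieving it); same O(n) cost, different structure.


-- ===== PORT A =====
-- A's loop: state (maxval, p); none = IndexError from y[i].
def maxptLoop (y : List Int) : List Int → Int × Int → Option (Int × Int)
  | [], st => some st
  | i :: rest, (maxval, p) =>
    match PySem.List.pyGet? y i with
    | none => none
    | some v => if maxval ≤ v then maxptLoop y rest (v, i) else maxptLoop y rest (maxval, p)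

def maxpt (x : List Int) (y : List Int) : Int :=
  match maxptLoop y x (0, 0) with
  | some (_, p) => p
  | none => 0  -- unreachable under Pre_: Python raises IndexError here

-- ===== PORT B =====
-- vals = [y[i] for i in x]  (none = IndexError)
def maxptVals? (y : List Int) : List Int → Option (List Int)
  | [] => some []
  | i :: rest =>
    match PySem.List.pyGet? y i, maxptVals? y rest with
    | some v, some vs => some (v :: vs)
    | _, _ => none

def maxpt_alt (x : List Int) (y : List Int) : Int :=
  match maxptVals? y x with
  | none => 0  -- unreachable under Pre_: Python raises IndexError here
  | some vals =>
    let m := vals.foldl max 0           -- max([0, *vals])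
    (x.zip vals).foldl (fun p iv => if iv.2 = m then iv.1 else p) 0

-- ===== PRECONDITION & SPEC =====
-- Pre_: every element of x is a valid Python index into y (A raises IndexError otherwise).
def Pre_maxpt (x : List Int) (y : List Int) : Prop :=
  ∀ i ∈ x, PySem.Raise.InRange y.length i
instance (x : List Int) (y : List Int) : Decidable (Pre_maxpt x y) := by unfold Pre_maxpt; infer_instance

def pvWitness_maxpt : List Int × List Int := ([0, 2, -1, 1], [3, 7, 7, -2])

def Spec_maxpt (x : List Int) (y : List Int) (out : Int) : Prop := out = maxpt_alt x y
instance (x : List Int) (y : List Int) (out : Int) : Decidable (Spec_maxpt x y out) := by unfold Spec_maxpt; infer_instance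

-- ===== CLAIM (what is proved, stated in full; the proofs are below) =====
def Claim_equal_maxpt : Prop := ∀ (x : List Int) (y : List Int), Dom_maxpt x y → Pre_maxpt x y → Spec_maxpt x y (maxpt x y)

-- ===== LEMMAS AND PROOFS =====

theorem le_foldl_max (l : List Int) (a : Int) : a ≤ l.foldl max a := by
  induction l generalizing a with
  | nil => simp
  | cons b t ih => exact le_trans (le_max_left a b) (ih (max a b))

theorem foldl_max_eq_or_mem (l : List Int) (a : Int) :
    l.foldl max a = a ∨ l.foldl max a ∈ l := by
  induction l generalizing a with
  | nil => simp
  | cons b t ih =>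
    rcases ih (max a b) with h | h
    · simp only [List.foldl_cons] at *
      rcases max_cases a b with ⟨he, _⟩ | ⟨he, _⟩
      · left; rw [h, he]
      · right; rw [h, he]; exact List.mem_cons_self
    · right; exact List.mem_cons_of_mem _ h

-- if some pair carries the value m, the fold's default is irrelevant
theorem foldl_last_default (pairs : List (Int × Int)) (m : Int)
    (h : ∃ q ∈ pairs, q.2 = m) (p p' : Int) :
    pairs.foldl (fun p iv => if iv.2 = m then iv.1 else p) p
      = pairs.foldl (fun p iv => if iv.2 = m then iv.1 else p) p' := by
  induction pairs generalizing p p' with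
  | nil => rcases h with ⟨q, hq, _⟩; exact absurd hq (List.not_mem_nil)
  | cons q t ih =>
    by_cases hq : q.2 = m
    · simp [hq]
    · rcases h with ⟨r, hr, hrm⟩
      rcases List.mem_cons.mp hr with rfl | hr
      · exact absurd hrm hq
      · simp only [List.foldl_cons, if_neg hq]
        exact ih ⟨r, hr, hrm⟩ p p'

-- membership in vals transfers to the zip (given equal lengths)
theorem mem_zip_of_mem_vals (l vals : List Int) (hlen : vals.length = l.length)
    (m : Int) (hm : m ∈ vals) : ∃ q ∈ l.zip vals, q.2 = m := by
  induction l generalizing vals with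
  | nil => cases vals with
    | nil => exact absurd hm (List.not_mem_nil)
    | cons v vs => simp at hlen
  | cons i t ih =>
    cases vals with
    | nil => exact absurd hm (List.not_mem_nil)
    | cons v vs =>
      simp only [List.length_cons, Nat.add_right_cancel_iff] at hlen
      rcases List.mem_cons.mp hm with rfl | hm'
      · exact ⟨(i, m), List.mem_cons_self, rfl⟩
      · rcases ih vs hlen hm' with ⟨q, hq, hqm⟩
        exact ⟨q, List.mem_cons_of_mem _ hq, hqm⟩

theorem maxptVals?_length (y l vals : List Int) (h : maxptVals? y l = some vals) :
    vals.length = l.length := by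
  induction l generalizing vals with
  | nil => simp [maxptVals?] at h; simp [← h]
  | cons i t ih =>
    simp only [maxptVals?] at h
    cases hg : PySem.List.pyGet? y i with
    | none => rw [hg] at h; simp at h
    | some v =>
      rw [hg] at h
      cases hr : maxptVals? y t with
      | none => rw [hr] at h; simp at h
      | some vs =>
        rw [hr] at h
        simp only [Option.some.injEq] at h
        subst h
        simp [ih vs hr]

-- the central invariant: A's loop computes the running max and the last index
-- achieving the FINAL max (default = the incoming p)
theorem maxptLoop_eq (y : List Int) (l : List Int) (vals : List Int)
    (hv : maxptVals? y l = some vals) (mv p : Int) :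
    maxptLoop y l (mv, p) =
      some (vals.foldl max mv,
        (l.zip vals).foldl (fun p iv => if iv.2 = vals.foldl max mv then iv.1 else p) p) := by
  induction l generalizing vals mv p with
  | nil =>
    simp [maxptVals?] at hv
    subst hv
    simp [maxptLoop]
  | cons i t ih =>
    simp only [maxptVals?] at hv
    cases hg : PySem.List.pyGet? y i with
    | none => rw [hg] at hv; simp at hv
    | some v =>
      rw [hg] at hv
      cases hr : maxptVals? y t with
      | none => rw [hr] at hv; simp at hv
      | some vs =>
        rw [hr] at hv
        simp only [Option.some.injEq] at hv
        subst hv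
        simp only [maxptLoop, hg, List.zip_cons_cons, List.foldl_cons]
        by_cases hle : mv ≤ v
        · rw [if_pos hle]
          have hmax : max mv v = v := max_eq_right hle
          simp only [hmax]
          rw [ih vs hr v i]
          -- compare defaults: i vs (if v = M then i else p)
          by_cases hvM : v = vs.foldl max v
          · rw [if_pos hvM]
          · rw [if_neg hvM]
            -- M > v, so M ∈ vs, default irrelevant
            have hM : vs.foldl max v ∈ vs := by
              rcases foldl_max_eq_or_mem vs v with h | h
              · exact absurd h.symm hvM
              · exact h
            have hz := mem_zip_of_mem_vals t vs (maxptVals?_length y t vs hr) _ hM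
            simp only [Option.some.injEq, Prod.mk.injEq, true_and]
            exact foldl_last_default _ _ hz i p
        · rw [if_neg hle]
          have hlt : v < mv := lt_of_not_ge hle
          have hmax : max mv v = mv := max_eq_left (le_of_lt hlt)
          simp only [hmax]
          rw [ih vs hr mv p]
          have hvM : ¬ v = vs.foldl max mv :=
            fun h => absurd (h ▸ le_foldl_max vs mv) (not_le.mpr hlt)
          rw [if_neg hvM]

theorem pre_vals_some (x y : List Int) (h : Pre_maxpt x y) :
    ∃ vals, maxptVals? y x = some vals := by
  induction x with
  | nil => exact ⟨[], rfl⟩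
  | cons i t ih =>
    have hi : PySem.Raise.InRange y.length i := h i List.mem_cons_self
    have ht : Pre_maxpt t y := fun j hj => h j (List.mem_cons_of_mem _ hj)
    rcases ih ht with ⟨vs, hvs⟩
    cases hg : PySem.List.pyGet? y i with
    | none => exact absurd hi ((PySem.List.pyGet?_eq_none_iff _ _).mp hg)
    | some v => exact ⟨v :: vs, by simp [maxptVals?, hg, hvs]⟩

-- ===== VERDICT (by name: the statement is the Claim_ definition above) =====
theorem maxpt_spec : Claim_equal_maxpt := by
  intro x y _ hpre
  unfold Spec_maxpt maxpt maxpt_alt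
  rcases pre_vals_some x y hpre with ⟨vals, hv⟩
  rw [hv, maxptLoop_eq y x vals hv 0 0]
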